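-- pv_equiv track=rewrite | github.com/walid-brahimdjelloul/A-game-nine-lives- | nine_lives.py | update_clue
-- ===== SOURCE A (Python) =====
-- def update_clue(guess, secret_word, clue, unknow_letter): ### this function is made to update the clue by its letter
--      index = 0
--      while index < len(secret_word):
--           if guess == secret_word[index]:
--                clue[index] = guess
--                unknow_letter -= 1
--           index += 1
--      return unknow_letter
-- ===== SOURCE B (Python) =====
-- def count_and_fill(guess, secret_word, clue, lo, hi):
--     # divide & conquer over the index range [lo, hi): reveal matches, return how many
--     if hi - lo == 0:
--         return 0
--     if hi - lo == 1:
--         if secret_word[lo] == guess: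
--             clue[lo] = guess
--             return 1
--         return 0
--     mid = (lo + hi) // 2
--     return count_and_fill(guess, secret_word, clue, lo, mid) + \
--            count_and_fill(guess, secret_word, clue, mid, hi)
--
-- def update_clue(guess, secret_word, clue, unknow_letter):
--     return unknow_letter - count_and_fill(guess, secret_word, clue, 0, len(secret_word))
-- ===== Notes on version B (the rewrite author's own statement) =====
-- stated objective: alternative
-- what changed: Replaces A's linear index while-loop with a divide-and-conquer recursion that halves the index range, reveals matches in each half and returns the match count, which is subtracted from unknow_letter once.
import Mathlib
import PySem

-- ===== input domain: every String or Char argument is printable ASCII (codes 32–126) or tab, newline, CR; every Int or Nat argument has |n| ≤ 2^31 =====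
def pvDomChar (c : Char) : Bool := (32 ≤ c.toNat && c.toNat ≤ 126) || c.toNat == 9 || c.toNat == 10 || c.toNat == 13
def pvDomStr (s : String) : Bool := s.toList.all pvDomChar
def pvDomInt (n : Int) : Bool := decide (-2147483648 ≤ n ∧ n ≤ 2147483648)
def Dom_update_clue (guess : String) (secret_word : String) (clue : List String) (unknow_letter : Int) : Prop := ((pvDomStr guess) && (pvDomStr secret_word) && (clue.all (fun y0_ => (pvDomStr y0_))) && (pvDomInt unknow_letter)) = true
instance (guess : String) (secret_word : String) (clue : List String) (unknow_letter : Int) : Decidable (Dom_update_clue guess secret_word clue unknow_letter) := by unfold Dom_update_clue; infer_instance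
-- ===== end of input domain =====

-- B replaces A's linear index loop by a divide-and-conquer recursion over the index range;
-- equivalence is about the RETURN value (both Pythons mutate clue at the same indices in place).

-- ===== PORT A =====
-- while-loop over indices carrying (index, clue, unknow_letter); clue[index] = guess is List.set
-- (Pre_ guarantees the index is in range wherever the branch fires, matching Python's IndexError domain).
def update_clue (guess : String) (secret_word : String) (clue : List String) (unknow_letter : Int) : Int :=
  (secret_word.toList.foldl
    (fun (st : Nat × List String × Int) c =>
      if guess == String.ofList [c] then (st.1 + 1, st.2.1.set st.1 guess, st.2.2 - 1)
      else (st.1 + 1, st.2.1, st.2.2))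
    (0, clue, unknow_letter)).2.2

-- ===== PORT B =====
-- Source B's divide-and-conquer helper: count (and, in Python, reveal) the matches in [lo, hi).
-- `fuel` is a totality guard only (the range shrinks strictly, so fuel = len(secret_word) is
-- always enough); `secret_word[lo]` is Str.pyGet? (none = the IndexError branch, unreachable:
-- lo < len(secret_word) whenever it is read); the in-place mutation of clue does not affect
-- the returned int, so clue is carried but unused.
def count_and_fill (guess : String) (secret_word : String) (clue : List String) (fuel : Nat) (lo : Int) (hi : Int) : Int :=
  match fuel with
  | 0 => 0
  | fuel + 1 =>
    if hi - lo ≤ 0 then 0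
    else if hi - lo = 1 then
      match PySem.Str.pyGet? secret_word lo with
      | some c => if String.ofList [c] == guess then 1 else 0
      | none => 0
    else
      let mid := PySem.Int.floordiv (lo + hi) 2
      count_and_fill guess secret_word clue fuel lo mid + count_and_fill guess secret_word clue fuel mid hi

def update_clue_alt (guess : String) (secret_word : String) (clue : List String) (unknow_letter : Int) : Int :=
  unknow_letter - count_and_fill guess secret_word clue secret_word.toList.length 0 (PySem.Str.len secret_word)

-- ===== PRECONDITION & SPEC =====
-- Pre_ excludes exactly the inputs on which Python A raises IndexError: a matching
-- letter at an index ≥ len(clue) (both A and B raise there).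
def Pre_update_clue (guess : String) (secret_word : String) (clue : List String) (unknow_letter : Int) : Prop :=
  ∀ i : Nat, i < secret_word.toList.length →
    guess = String.ofList [secret_word.toList.getD i ' '] → i < clue.length
instance (guess : String) (secret_word : String) (clue : List String) (unknow_letter : Int) : Decidable (Pre_update_clue guess secret_word clue unknow_letter) := by unfold Pre_update_clue; infer_instance

def pvWitness_update_clue : String × String × List String × Int := ("a", "abca", ["_", "_", "_", "_"], 3)

def Spec_update_clue (guess : String) (secret_word : String) (clue : List String) (unknow_letter : Int) (out : Int) : Prop := out = update_clue_alt guess secret_word clue unknow_letter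
instance (guess : String) (secret_word : String) (clue : List String) (unknow_letter : Int) (out : Int) : Decidable (Spec_update_clue guess secret_word clue unknow_letter out) := by unfold Spec_update_clue; infer_instance

-- ===== CLAIM (what is proved, stated in full; the proofs are below) =====
def Claim_equal_update_clue : Prop := ∀ (guess : String) (secret_word : String) (clue : List String) (unknow_letter : Int), Dom_update_clue guess secret_word clue unknow_letter → Pre_update_clue guess secret_word clue unknow_letter → Spec_update_clue guess secret_word clue unknow_letter (update_clue guess secret_word clue unknow_letter)

-- ===== LEMMAS AND PROOFS =====
theorem update_clue_foldl (guess : String) (cs : List Char)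
    (i : Nat) (cl : List String) (u : Int) :
    (cs.foldl
      (fun (st : Nat × List String × Int) c =>
        if guess == String.ofList [c] then (st.1 + 1, st.2.1.set st.1 guess, st.2.2 - 1)
        else (st.1 + 1, st.2.1, st.2.2))
      (i, cl, u)).2.2
    = u - (cs.countP (fun c => String.ofList [c] == guess) : Int) := by
  induction cs generalizing i cl u with
  | nil => simp
  | cons c cs ih =>
    have hcnt : ((c :: cs).countP (fun c => String.ofList [c] == guess) : Int)
        = (if String.ofList [c] == guess then 1 else 0) + (cs.countP (fun c => String.ofList [c] == guess) : Int) := by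
      rw [List.countP_cons]
      split <;> push_cast <;> ring
    rw [List.foldl_cons, hcnt]
    by_cases h : guess = String.ofList [c]
    · have h1 : (guess == String.ofList [c]) = true := by simpa using h
      have h2 : (String.ofList [c] == guess) = true := by simpa using h.symm
      rw [if_pos h1, ih, if_pos h2]; ring
    · have h1 : (guess == String.ofList [c]) = false := by simpa using h
      have h2 : (String.ofList [c] == guess) = false := by
        simpa using fun e => h e.symm
      rw [if_neg (by simp [h1]), ih, if_neg (by simp [h2])]; ring

-- count_and_fill on the nat range [lo, hi) counts the matching characters of that segment
theorem count_and_fill_eq (guess secret_word : String) (cl : List String) :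
    ∀ (fuel : Nat) (lo hi : Nat), hi - lo ≤ fuel →
    count_and_fill guess secret_word cl fuel (lo : Int) (hi : Int)
      = (((secret_word.toList.drop lo).take (hi - lo)).countP
          (fun c => String.ofList [c] == guess) : Int) := by
  intro fuel
  induction fuel with
  | zero =>
    intro lo hi hn
    have : hi - lo = 0 := by omega
    rw [this]
    simp [count_and_fill]
  | succ fuel ih =>
    intro lo hi hn
    rw [count_and_fill]
    by_cases h0 : (hi : Int) - (lo : Int) ≤ 0
    · have : hi - lo = 0 := by omega
      rw [if_pos h0, this]
      simp
    · rw [if_neg h0]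
      by_cases h1 : (hi : Int) - (lo : Int) = 1
      · have hh : hi = lo + 1 := by omega
        rw [if_pos h1]
        subst hh
        rcases Nat.lt_or_ge lo secret_word.toList.length with hlt | hge
        · have hget : PySem.Str.pyGet? secret_word (lo : Int) = some secret_word.toList[lo] := by
            simp [List.getElem?_eq_getElem hlt]
          rw [hget]
          have htake : (secret_word.toList.drop lo).take (lo + 1 - lo)
              = [secret_word.toList[lo]] := by
            have : lo + 1 - lo = 1 := by omega
            rw [this, List.take_one, List.head?_drop]
            simp [List.getElem?_eq_getElem hlt]
          rw [htake]
          rw [List.countP_cons]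
          simp only [List.countP_nil]
          split <;> simp
        · have hget : PySem.Str.pyGet? secret_word (lo : Int) = none := by
            simp [List.getElem?_eq_none_iff.mpr hge]
          rw [hget]
          have : secret_word.toList.drop lo = [] := List.drop_eq_nil_of_le hge
          simp [this]
      · rw [if_neg h1]
        have h2 : lo + 2 ≤ hi := by omega
        have hm : PySem.Int.floordiv ((lo : Int) + hi) 2 = ((lo : Int) + hi) / 2 :=
          PySem.Int.floordiv_eq_ediv_of_pos (by omega)
        set midN : Nat := (lo + hi) / 2 with hmidN
        have hmcast : ((lo : Int) + hi) / 2 = (midN : Int) := by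
          rw [hmidN]; omega
        have hb1 : lo < midN := by omega
        have hb2 : midN < hi := by omega
        have ih1 := ih lo midN (by omega)
        have ih2 := ih midN hi (by omega)
        simp only [hm, hmcast, ih1, ih2]
        have hsplit : (secret_word.toList.drop lo).take (hi - lo)
            = (secret_word.toList.drop lo).take (midN - lo)
              ++ (secret_word.toList.drop midN).take (hi - midN) := by
          have hdd : secret_word.toList.drop midN
              = (secret_word.toList.drop lo).drop (midN - lo) := by
            rw [List.drop_drop]
            congr 1
            omega
          rw [hdd, ← List.take_add]
          congr 1
          omega
        rw [hsplit, List.countP_append]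
        push_cast
        ring

-- ===== VERDICT (by name: the statement is the Claim_ definition above) =====
theorem update_clue_spec : Claim_equal_update_clue := by
  intro guess secret_word clue unknow_letter _ _
  unfold Spec_update_clue update_clue update_clue_alt
  rw [update_clue_foldl]
  have h := count_and_fill_eq guess secret_word clue secret_word.toList.length 0 secret_word.toList.length (by omega)
  have hlen : PySem.Str.len secret_word = (secret_word.toList.length : Int) := by
    simp [PySem.Str.len_eq]
  rw [hlen]
  simp only [Nat.cast_zero] at h ⊢
  rw [h]
  have hlen2 : secret_word.toList.length = secret_word.length := by simp
  simp only [Nat.sub_zero, List.drop_zero, hlen2]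
  rw [List.take_of_length_le (le_of_eq hlen2)]
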